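-- pv_equiv track=rewrite | github.com/flaviodetimones/vlmap-semantic-object-search | tools/place_small_objects.py | _safe_template_for_category
-- ===== SOURCE A (Python) =====
-- from typing import Any, Dict, List, Optional, Tuple
--
-- def _safe_template_for_category(
--     catalog: Dict[str, List[str]], category: str
-- ) -> Optional[str]:
--     """Pick a deterministic template id for a given small-object category."""
--     cat = category.strip().lower()
--     options = catalog.get(cat, [])
--     if not options:
--         return None
--     # Prefer "human-readable" template ids (e.g. ``Book_5``) over hashes
--     # for easier audit; fall back to alphabetical if none.
--     readable = [t for t in options if not all(c in "0123456789abcdef" for c in t.lower())]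
--     pool = readable or options
--     pool = sorted(pool)
--     return pool[0]
-- ===== SOURCE B (Python) =====
-- def _safe_template_for_category(catalog, category):
--     """Pick a deterministic template id for a given small-object category."""
--     cat = category.strip().lower()
--     best_readable = None
--     best_any = None
--     for t in catalog.get(cat, []):
--         if best_any is None or t < best_any:
--             best_any = t
--         if not all(c in "0123456789abcdef" for c in t.lower()):
--             if best_readable is None or t < best_readable:
--                 best_readable = t
--     return best_readable if best_readable is not None else best_any
-- ===== Notes on version B (the rewrite author's own statement) =====
-- stated objective: alternative
-- what changed: Replaces A's build-a-filtered-list + sort + take-index-0 with a single left-to-right pass over the options that maintains two running minima (smallest readable id, smallest id overall) and prefers the readable one.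
import Mathlib
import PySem

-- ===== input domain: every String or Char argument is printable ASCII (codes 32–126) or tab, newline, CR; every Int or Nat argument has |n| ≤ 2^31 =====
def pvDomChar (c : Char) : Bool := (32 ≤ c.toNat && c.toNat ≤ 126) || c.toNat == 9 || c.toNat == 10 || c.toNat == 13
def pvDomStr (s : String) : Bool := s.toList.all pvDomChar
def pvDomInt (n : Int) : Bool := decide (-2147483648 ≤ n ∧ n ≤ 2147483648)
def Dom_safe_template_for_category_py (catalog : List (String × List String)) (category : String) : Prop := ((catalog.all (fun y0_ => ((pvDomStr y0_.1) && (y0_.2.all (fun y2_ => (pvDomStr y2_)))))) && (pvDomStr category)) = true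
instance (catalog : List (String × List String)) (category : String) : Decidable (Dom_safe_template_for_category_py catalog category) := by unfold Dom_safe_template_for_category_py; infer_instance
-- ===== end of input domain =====

-- B replaces A's filter + sort + index-0 with one min-tracking pass over the options (objective: alternative decomposition).


-- ===== PORT A =====
-- all(c in "0123456789abcdef" for c in t.lower())
def pvAllHexish (t : String) : Bool :=
  (PySem.Str.lower t).toList.all (fun c => "0123456789abcdef".toList.contains c)

def safe_template_for_category_py (catalog : List (String × List String)) (category : String) : Option String :=
  let cat := PySem.Str.lower (PySem.Str.strip category)
  let options := (PySem.Dict.mk catalog).getD cat []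
  if options = [] then none
  else
    let readable := options.filter (fun t => !pvAllHexish t)
    let pool := if readable = [] then options else readable
    let pool := PySem.List.sorted pool (fun x => x) false
    PySem.List.pyGet? pool 0

-- ===== PORT B =====
-- 'best is None or t < best' update of a running minimum
def pvMinUpd (b : Option String) (t : String) : Option String :=
  match b with
  | none => some t
  | some b => if t < b then some t else some b

def safe_template_for_category_py_alt (catalog : List (String × List String)) (category : String) : Option String :=
  let cat := PySem.Str.lower (PySem.Str.strip category)
  let res := ((PySem.Dict.mk catalog).getD cat []).foldl
    (fun (s : Option String × Option String) t =>
      (if !pvAllHexish t then pvMinUpd s.1 t else s.1, pvMinUpd s.2 t))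
    (none, none)
  match res.1 with
  | some r => some r
  | none => res.2

-- ===== PRECONDITION & SPEC =====
def Spec_safe_template_for_category_py (catalog : List (String × List String)) (category : String) (out : Option String) : Prop := out = safe_template_for_category_py_alt catalog category
instance (catalog : List (String × List String)) (category : String) (out : Option String) : Decidable (Spec_safe_template_for_category_py catalog category out) := by unfold Spec_safe_template_for_category_py; infer_instance

-- ===== CLAIM (what is proved, stated in full; the proofs are below) =====
def Claim_equal_safe_template_for_category_py : Prop := ∀ (catalog : List (String × List String)) (category : String), Dom_safe_template_for_category_py catalog category → Spec_safe_template_for_category_py catalog category (safe_template_for_category_py catalog category)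

-- ===== LEMMAS AND PROOFS =====

-- the paired fold is two independent folds; the readable one is a fold over the filtered list
theorem pvFold_pair (l : List String) (r a : Option String) :
    l.foldl (fun (s : Option String × Option String) t =>
        (if !pvAllHexish t then pvMinUpd s.1 t else s.1, pvMinUpd s.2 t)) (r, a)
      = ((l.filter (fun t => !pvAllHexish t)).foldl pvMinUpd r, l.foldl pvMinUpd a) := by
  rw [PySem.List.foldl_prod_mk (f := fun acc t => if !pvAllHexish t then pvMinUpd acc t else acc) (g := pvMinUpd),
      PySem.List.foldl_if_eq_foldl_filter]

theorem pvFoldMin_none_iff (l : List String) (acc : Option String) :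
    l.foldl pvMinUpd acc = none ↔ (acc = none ∧ l = []) := by
  induction l generalizing acc with
  | nil => simp
  | cons x xs ih =>
    simp only [List.foldl_cons, ih]
    constructor
    · rintro ⟨h, _⟩
      cases acc with
      | none => simp [pvMinUpd] at h
      | some b => simp [pvMinUpd] at h; split at h <;> simp_all
    · rintro ⟨_, h⟩; simp at h

theorem pvFoldMin_spec (l : List String) :
    ∀ (acc : Option String) (m : String), l.foldl pvMinUpd acc = some m →
    (acc = some m ∨ m ∈ l) ∧ (∀ y ∈ l, m ≤ y) ∧ (∀ b, acc = some b → m ≤ b) := by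
  induction l with
  | nil => intro acc m h; simp at h; simp [h]
  | cons x xs ih =>
    intro acc m h
    simp only [List.foldl_cons] at h
    obtain ⟨hmem, hmin, hacc⟩ := ih (pvMinUpd acc x) m h
    have key : m ≤ x ∧ (∀ b, acc = some b → m ≤ b) ∧ (acc = some m ∨ m = x ∨ m ∈ xs) := by
      cases acc with
      | none =>
        have hx : m ≤ x := hacc x (by simp [pvMinUpd])
        refine ⟨hx, by simp, ?_⟩
        rcases hmem with hm | hm
        · right; left; exact (by simpa [pvMinUpd] using hm : x = m).symm
        · right; right; exact hm
      | some b =>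
        by_cases hxb : x < b
        · have hx : m ≤ x := hacc x (by simp [pvMinUpd, hxb])
          refine ⟨hx, fun c hc => by cases hc; exact hx.trans hxb.le, ?_⟩
          rcases hmem with hm | hm
          · right; left; exact (by simpa [pvMinUpd, hxb] using hm : x = m).symm
          · right; right; exact hm
        · have hb : m ≤ b := hacc b (by simp [pvMinUpd, hxb])
          have hx : m ≤ x := hb.trans (not_lt.mp hxb)
          refine ⟨hx, fun c hc => by cases hc; exact hb, ?_⟩
          rcases hmem with hm | hm
          · left
            have hbm : b = m := by simpa [pvMinUpd, hxb] using hm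
            exact congrArg some hbm
          · right; right; exact hm
    obtain ⟨hx, hbnd, hm3⟩ := key
    refine ⟨?_, ?_, hbnd⟩
    · rcases hm3 with h' | h' | h'
      · left; exact h'
      · right; simp [h']
      · right; simp [h']
    · intro y hy
      rcases List.mem_cons.mp hy with rfl | hy2
      · exact hx
      · exact hmin y hy2

-- sorted(pool)[0] is the running minimum of pool
theorem pvSortedHead_eq_foldMin (l : List String) (hne : l ≠ []) :
    PySem.List.pyGet? (PySem.List.sorted l (fun x => x) false) 0 = l.foldl pvMinUpd none := by
  obtain ⟨m, hm⟩ : ∃ m, l.foldl pvMinUpd none = some m := by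
    cases hfold : l.foldl pvMinUpd none with
    | none => exact absurd ((pvFoldMin_none_iff l none).mp hfold).2 hne
    | some m => exact ⟨m, rfl⟩
  obtain ⟨hmem, hmin, -⟩ := pvFoldMin_spec l none m hm
  have hmem' : m ∈ l := by
    rcases hmem with h | h
    · exact absurd h (by simp)
    · exact h
  cases hs : PySem.List.sorted l (fun x => x) false with
  | nil => exact absurd ((PySem.List.sorted_eq_nil_iff l (fun x => x) false).mp hs) hne
  | cons h t =>
    have hhd : ∀ y ∈ l, h ≤ y := fun y hy => PySem.List.key_head_sorted_le l (fun x => x) hs y hy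
    have hhl : h ∈ l := (PySem.List.sorted_perm l (fun x => x) false).mem_iff.mp (by rw [hs]; exact List.mem_cons_self ..)
    have heq : h = m := le_antisymm (hhd m hmem') (hmin h hhl)
    rw [hm, heq]
    simp [PySem.List.pyGet?, PySem.List.pyIdx?]

theorem pv_core (options : List String) :
    (if options = [] then none
     else PySem.List.pyGet?
       (PySem.List.sorted (if options.filter (fun t => !pvAllHexish t) = []
          then options else options.filter (fun t => !pvAllHexish t)) (fun x => x) false) 0)
    = (match (options.foldl (fun (s : Option String × Option String) t =>
          (if !pvAllHexish t then pvMinUpd s.1 t else s.1, pvMinUpd s.2 t)) (none, none)).1 with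
       | some r => some r
       | none => (options.foldl (fun (s : Option String × Option String) t =>
          (if !pvAllHexish t then pvMinUpd s.1 t else s.1, pvMinUpd s.2 t)) (none, none)).2) := by
  rw [pvFold_pair]
  by_cases hopt : options = []
  · simp [hopt]
  · rw [if_neg hopt]
    by_cases hr : options.filter (fun t => !pvAllHexish t) = []
    · rw [if_pos hr, hr]
      simp only [List.foldl_nil]
      rw [pvSortedHead_eq_foldMin options hopt]
    · rw [if_neg hr]
      rw [pvSortedHead_eq_foldMin _ hr]
      obtain ⟨m, hm⟩ : ∃ m, (options.filter (fun t => !pvAllHexish t)).foldl pvMinUpd none = some m := by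
        cases hfold : (options.filter (fun t => !pvAllHexish t)).foldl pvMinUpd none with
        | none => exact absurd ((pvFoldMin_none_iff _ none).mp hfold).2 hr
        | some m => exact ⟨m, rfl⟩
      rw [hm]

theorem pv_main (catalog : List (String × List String)) (category : String) :
    safe_template_for_category_py catalog category = safe_template_for_category_py_alt catalog category := by
  unfold safe_template_for_category_py safe_template_for_category_py_alt
  exact pv_core _

-- ===== VERDICT (by name: the statement is the Claim_ definition above) =====
theorem safe_template_for_category_py_spec : Claim_equal_safe_template_for_category_py := by
  intro catalog category _
  unfold Spec_safe_template_for_category_py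
  exact pv_main catalog category
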